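-- pv_equiv track=rewrite | github.com/RemiErr/2026-python | weeks/week-07/solutions/1111405012/question-10071.py | count_sextuples
-- ===== SOURCE A (Python) =====
-- from collections import Counter
--
-- def count_sextuples(numbers: list[int]) -> int:
--     # 先統計所有有序的兩數和。
--     pair_count: Counter[int] = Counter()
--     for first in numbers:
--         for second in numbers:
--             pair_count[first + second] += 1
--
--     pair_items = list(pair_count.items())
--
--     # 再把第三個數加進去，得到所有有序三數和的數量。
--     triple_count: Counter[int] = Counter()
--     for third in numbers:
--         for pair_sum, ways in pair_items:
--             triple_count[pair_sum + third] += ways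
--
--     triple_items = list(triple_count.items())
--
--     # 五數和可拆成三數和 + 兩數和，最後再比對 f 是否在集合裡。
--     answer = 0
--     for target in numbers:
--         for triple_sum, triple_ways in triple_items:
--             answer += triple_ways * pair_count.get(target - triple_sum, 0)
--
--     return answer
-- ===== SOURCE B (Python) =====
-- from collections import Counter
--
-- def convolve(d1, d2):
--     out = Counter()
--     for v, cv in d1.items():
--         for w, cw in d2.items():
--             out[v + w] += cv * cw
--     return out
--
-- def count_sextuples(numbers: list[int]) -> int:
--     # Generating-function view: with p the value-frequency polynomial of the input,
--     # build the full five-sum distribution p^5 = ((((p*p)*p)*p)*p) with one generic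
--     # convolve helper, then dot-product its coefficients with the frequencies.
--     # (A never materializes p^5: it combines a triple counter with a pair counter
--     # through a difference lookup per target.)
--     p = Counter(numbers)
--     p5 = p
--     for _ in range(4):
--         p5 = convolve(p5, p)
--     return sum(c * p5.get(v, 0) for v, c in p.items())
-- ===== Notes on version B (the rewrite author's own statement) =====
-- stated objective: alternative
-- what changed: B treats the value-frequency Counter as a generating polynomial, materializes the full five-sum distribution p^5 by four convolutions of p with itself through one generic convolve helper, and returns the dot product of p^5's coefficients with the frequencies; A never builds the 4- or 5-sum distribution, instead combining a pair-sum counter and a triple-sum counter with a per-target difference lookup pair[target - triple_sum] over the raw list.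
import Mathlib
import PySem

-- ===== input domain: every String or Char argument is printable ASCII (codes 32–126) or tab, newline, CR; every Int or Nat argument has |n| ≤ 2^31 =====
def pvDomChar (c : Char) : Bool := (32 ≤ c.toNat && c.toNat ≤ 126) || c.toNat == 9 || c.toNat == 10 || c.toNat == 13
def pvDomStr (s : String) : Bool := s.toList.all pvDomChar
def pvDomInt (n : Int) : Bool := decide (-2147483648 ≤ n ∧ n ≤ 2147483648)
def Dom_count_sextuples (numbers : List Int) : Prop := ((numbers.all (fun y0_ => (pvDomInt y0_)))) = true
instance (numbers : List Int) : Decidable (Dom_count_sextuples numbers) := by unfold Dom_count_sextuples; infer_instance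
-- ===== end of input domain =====

-- B materializes the full five-sum distribution p^5 by repeatedly convolving the
-- value-frequency polynomial with itself, then dot-products it with the frequencies,
-- instead of A's pair/triple counters combined through a per-target difference lookup.

-- ===== PORT A =====
def count_sextuples (numbers : List Int) : Int :=
  let pair_count : PySem.Dict Int Int := numbers.foldl (fun d first =>
    numbers.foldl (fun d second => d.modify (first + second) 0 (· + 1)) d) PySem.Dict.empty
  let pair_items := pair_count.items
  let triple_count : PySem.Dict Int Int := numbers.foldl (fun d third =>
    pair_items.foldl (fun d p => d.modify (p.1 + third) 0 (· + p.2)) d) PySem.Dict.empty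
  let triple_items := triple_count.items
  numbers.foldl (fun answer target =>
    triple_items.foldl (fun answer p => answer + p.2 * pair_count.getD (target - p.1) 0) answer) 0

-- ===== PORT B =====
-- Source B's convolve helper: multiply two coefficient dicts
def pvConvolve (d1 d2 : PySem.Dict Int Int) : PySem.Dict Int Int :=
  d1.items.foldl (fun out p =>
    d2.items.foldl (fun out q => out.modify (p.1 + q.1) 0 (· + p.2 * q.2)) out) PySem.Dict.empty

def count_sextuples_alt (numbers : List Int) : Int :=
  let p : PySem.Dict Int Int := PySem.Dict.counter numbers
  let p5 := (PySem.List.pyRange 0 4 1).foldl (fun p5 _ => pvConvolve p5 p) p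
  (p.items.map (fun q => q.2 * p5.getD q.1 0)).sum

-- ===== PRECONDITION & SPEC =====
def Spec_count_sextuples (numbers : List Int) (out : Int) : Prop := out = count_sextuples_alt numbers
instance (numbers : List Int) (out : Int) : Decidable (Spec_count_sextuples numbers out) := by unfold Spec_count_sextuples; infer_instance

-- ===== CLAIM (what is proved, stated in full; the proofs are below) =====
def Claim_equal_count_sextuples : Prop := ∀ (numbers : List Int), Dom_count_sextuples numbers → Spec_count_sextuples numbers (count_sextuples numbers)

-- ===== LEMMAS AND PROOFS =====

-- Counter increment step: d[k] += w for an increment (k, w).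
def pvStep (d : PySem.Dict Int Int) (p : Int × Int) : PySem.Dict Int Int := d.modify p.1 0 (· + p.2)

-- total weight an increment stream deposits at key x
def pvCntAt (inc : List (Int × Int)) (x : Int) : Int := (inc.map (fun p => if p.1 = x then p.2 else 0)).sum

lemma getD_foldl_pvStep (inc : List (Int × Int)) (d : PySem.Dict Int Int) (x : Int) :
    (inc.foldl pvStep d).getD x 0 = d.getD x 0 + pvCntAt inc x := by
  induction inc generalizing d with
  | nil => simp [pvCntAt]
  | cons p t ih =>
    rw [List.foldl_cons, ih]
    show (d.modify p.1 0 (· + p.2)).getD x 0 + pvCntAt t x = _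
    rw [PySem.Dict.getD_modify]
    by_cases h : x = p.1
    · subst h
      simp [pvCntAt]
      ring
    · have h' : ¬ p.1 = x := fun e => h e.symm
      simp [pvCntAt, h, h']

lemma nodup_keys_foldl_pvStep (inc : List (Int × Int)) :
    (inc.foldl pvStep PySem.Dict.empty).keys.Nodup := by
  have := PySem.Dict.nodup_keys_foldl_modify_key inc Prod.fst 0
      (fun d p => (· + p.2)) PySem.Dict.empty (by simp)
  exact this

lemma keys_foldl_pvStep (inc : List (Int × Int)) :
    (inc.foldl pvStep PySem.Dict.empty).keys = PySem.Set.ofList (inc.map (·.1)) := by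
  have := PySem.Dict.keys_foldl_modify_key inc Prod.fst 0
      (fun d p => (· + p.2)) PySem.Dict.empty
  simpa [PySem.Set.update_nil_left] using this

lemma pvSum_ite_single (S : List Int) (hnd : S.Nodup) (x : Int) (hx : x ∈ S) (c : Int → Int) :
    (S.map (fun k => if x = k then c k else 0)).sum = c x := by
  induction S with
  | nil => cases hx
  | cons a t ih =>
    rcases List.mem_cons.mp hx with h | h
    · subst h
      have hnotin : x ∉ t := (List.nodup_cons.mp hnd).1
      simp only [List.map_cons, List.sum_cons]
      have : (t.map (fun k => if x = k then c k else 0)).sum = 0 := by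
        apply List.sum_eq_zero; intro y hy
        rcases List.mem_map.mp hy with ⟨k, hk, rfl⟩
        have : x ≠ k := fun e => hnotin (e ▸ hk)
        simp [this]
      simp [this]
    · have hax : x ≠ a := by
        rintro rfl; exact (List.nodup_cons.mp hnd).1 h
      simp only [List.map_cons, List.sum_cons, if_neg hax]
      rw [ih (List.nodup_cons.mp hnd).2 h]
      ring

lemma pvCntAt_zero_of_not_mem (inc : List (Int × Int)) (x : Int) (h : x ∉ inc.map (·.1)) :
    pvCntAt inc x = 0 := by
  apply List.sum_eq_zero; intro y hy
  rcases List.mem_map.mp hy with ⟨p, hp, rfl⟩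
  have : p.1 ≠ x := fun e => h (e ▸ List.mem_map_of_mem hp)
  simp [this]

lemma pvFiber (inc : List (Int × Int)) (g : Int → Int) :
    ((PySem.Set.ofList (inc.map (·.1))).map (fun k => pvCntAt inc k * g k)).sum
      = (inc.map (fun p => p.2 * g p.1)).sum := by
  induction inc using List.reverseRecOn with
  | nil => simp [pvCntAt]
  | append_singleton t p ih =>
    have hcnt : ∀ x, pvCntAt (t ++ [p]) x = pvCntAt t x + (if p.1 = x then p.2 else 0) := by
      intro x; simp [pvCntAt]
    rw [List.map_append, PySem.Set.ofList_append]
    simp only [List.map_cons, List.map_nil]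
    rw [PySem.Set.update_cons, PySem.Set.update_nil]
    by_cases hmem : p.1 ∈ PySem.Set.ofList (t.map (·.1))
    · rw [PySem.Set.add_of_mem hmem]
      have split : ((PySem.Set.ofList (t.map (·.1))).map (fun k => pvCntAt (t ++ [p]) k * g k)).sum
          = ((PySem.Set.ofList (t.map (·.1))).map (fun k => pvCntAt t k * g k)).sum
            + ((PySem.Set.ofList (t.map (·.1))).map (fun k => if p.1 = k then p.2 * g k else 0)).sum := by
        rw [← List.sum_map_add]
        apply congrArg; apply List.map_congr_left; intro k _
        rw [hcnt k]; split_ifs <;> ring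
      rw [split, ih, pvSum_ite_single _ (PySem.Set.nodup_ofList _) _ hmem]
      simp
    · rw [PySem.Set.add_of_not_mem hmem, List.map_append, List.sum_append]
      have heq : ((PySem.Set.ofList (t.map (·.1))).map (fun k => pvCntAt (t ++ [p]) k * g k))
          = ((PySem.Set.ofList (t.map (·.1))).map (fun k => pvCntAt t k * g k)) := by
        apply List.map_congr_left; intro k hk
        have : p.1 ≠ k := fun e => hmem (e ▸ hk)
        rw [hcnt k, if_neg this, add_zero]
      have hnot : p.1 ∉ t.map (·.1) := fun h => hmem (by simp [PySem.Set.mem_ofList, h])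
      rw [heq, ih]
      simp only [List.map_cons, List.map_nil, List.sum_cons, List.sum_nil]
      rw [hcnt p.1, pvCntAt_zero_of_not_mem t p.1 hnot]
      simp [List.map_append]

-- the weighted items-sum of a counter built from an increment stream is the stream's sum
lemma pvS_build (inc : List (Int × Int)) (g : Int → Int) :
    (((inc.foldl pvStep PySem.Dict.empty).items).map (fun p => p.2 * g p.1)).sum
      = (inc.map (fun p => p.2 * g p.1)).sum := by
  rw [PySem.Dict.items_eq_map_keys _ (nodup_keys_foldl_pvStep inc) 0, List.map_map]
  have : ((inc.foldl pvStep PySem.Dict.empty).keys.map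
        ((fun p : Int × Int => p.2 * g p.1) ∘ fun k => (k, (inc.foldl pvStep PySem.Dict.empty).getD k 0)))
      = ((inc.foldl pvStep PySem.Dict.empty).keys.map (fun k => pvCntAt inc k * g k)) := by
    apply List.map_congr_left; intro k _
    simp [Function.comp, getD_foldl_pvStep]
  rw [this, keys_foldl_pvStep, pvFiber]

lemma pvSum_flatMap {α : Type} (l : List α) (f : α → List Int) :
    ((l.flatMap f).sum) = (l.map (fun a => (f a).sum)).sum := by
  simp [List.flatMap, List.sum_flatten]
  rfl

lemma pvFactor (L : List (Int × Int)) (A : Int) (B : Int → Int) :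
    (L.map (fun q => A * q.2 * B q.1)).sum = A * (L.map (fun q => q.2 * B q.1)).sum := by
  rw [← List.sum_map_mul_left]
  apply congrArg; apply List.map_congr_left; intro q _; ring

-- sum exchange over two nested list sums
lemma pvSum_comm {α β : Type} (l : List α) (m : List β) (F : α → β → Int) :
    (l.map (fun a => (m.map (fun b => F a b)).sum)).sum
      = (m.map (fun b => (l.map (fun a => F a b)).sum)).sum := by
  induction l with
  | nil =>
    simp
  | cons a t ih =>
    simp only [List.map_cons, List.sum_cons, ih]
    rw [← List.sum_map_add]

-- ===== A's closed form =====

-- A's increment streams and dicts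
def pvIncPA (l : List Int) : List (Int × Int) :=
  l.flatMap (fun a => l.map (fun b => ((a + b : Int), (1 : Int))))
def pvPairA (l : List Int) : PySem.Dict Int Int := (pvIncPA l).foldl pvStep PySem.Dict.empty
def pvIncTA (l : List Int) : List (Int × Int) :=
  l.flatMap (fun c => (pvPairA l).items.map (fun p => (p.1 + c, p.2)))

-- number of ordered pairs from l summing to x
def pvP2 (l : List Int) (x : Int) : Int :=
  (l.map (fun a => (l.map (fun b => if a + b = x then (1 : Int) else 0)).sum)).sum

-- the common closed form of both programs (A's nesting order)
def pvF6 (l : List Int) : Int :=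
  (l.map (fun t => (l.map (fun c => (l.map (fun a =>
    (l.map (fun b => pvP2 l (t - (a + b + c)))).sum)).sum)).sum)).sum

lemma pvPairA_eq (l : List Int) :
    l.foldl (fun d first => l.foldl (fun d second => d.modify (first + second) 0 (· + 1)) d)
      PySem.Dict.empty = pvPairA l := by
  unfold pvPairA pvIncPA
  rw [List.foldl_flatMap]
  have : (fun (d : PySem.Dict Int Int) (a : Int) =>
        (l.map (fun b => ((a + b : Int), (1 : Int)))).foldl pvStep d)
      = (fun d a => l.foldl (fun d b => d.modify (a + b) 0 (· + 1)) d) := by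
    funext d a; rw [List.foldl_map]; rfl
  rw [this]

lemma pvTripleA_eq (l : List Int) :
    l.foldl (fun d third =>
        (pvPairA l).items.foldl (fun d p => d.modify (p.1 + third) 0 (· + p.2)) d)
      PySem.Dict.empty = (pvIncTA l).foldl pvStep PySem.Dict.empty := by
  unfold pvIncTA
  rw [List.foldl_flatMap]
  have : (fun (d : PySem.Dict Int Int) (c : Int) =>
        ((pvPairA l).items.map (fun p => (p.1 + c, p.2))).foldl pvStep d)
      = (fun d c => (pvPairA l).items.foldl (fun d p => d.modify (p.1 + c) 0 (· + p.2)) d) := by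
    funext d c; rw [List.foldl_map]; rfl
  rw [this]

lemma pvPairA_getD (l : List Int) (x : Int) : (pvPairA l).getD x 0 = pvP2 l x := by
  unfold pvPairA
  rw [getD_foldl_pvStep]
  unfold pvCntAt pvIncPA pvP2
  rw [PySem.Dict.getD_empty, zero_add, List.map_flatMap, pvSum_flatMap]
  apply congrArg; apply List.map_congr_left; intro a _
  rw [List.map_map]
  rfl

lemma A_closed (l : List Int) : count_sextuples l = pvF6 l := by
  unfold count_sextuples
  dsimp only
  rw [pvPairA_eq, pvTripleA_eq]
  have hin : ∀ (t : Int) (ans : Int),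
      ((pvIncTA l).foldl pvStep PySem.Dict.empty).items.foldl
        (fun ans p => ans + p.2 * (pvPairA l).getD (t - p.1) 0) ans
      = ans + (((pvIncTA l).foldl pvStep PySem.Dict.empty).items.map
          (fun p => p.2 * (pvPairA l).getD (t - p.1) 0)).sum := by
    intro t ans
    exact PySem.List.foldl_add _ _ _
  have : (fun (answer : Int) (target : Int) =>
        ((pvIncTA l).foldl pvStep PySem.Dict.empty).items.foldl
          (fun answer p => answer + p.2 * (pvPairA l).getD (target - p.1) 0) answer)
      = (fun answer target => answer + (((pvIncTA l).foldl pvStep PySem.Dict.empty).items.map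
          (fun p => p.2 * (pvPairA l).getD (target - p.1) 0)).sum) := by
    funext ans t; exact hin t ans
  rw [this, PySem.List.foldl_add, zero_add]
  unfold pvF6
  apply congrArg; apply List.map_congr_left; intro t _
  rw [pvS_build (pvIncTA l) (fun s => (pvPairA l).getD (t - s) 0)]
  unfold pvIncTA
  rw [List.map_flatMap, pvSum_flatMap]
  apply congrArg; apply List.map_congr_left; intro c _
  rw [List.map_map]
  have : ((fun p : Int × Int => p.2 * (pvPairA l).getD (t - p.1) 0) ∘ fun p => (p.1 + c, p.2))
      = fun p : Int × Int => p.2 * (fun s => (pvPairA l).getD (t - (s + c)) 0) p.1 := rfl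
  rw [this, show (pvPairA l).items = ((pvIncPA l).foldl pvStep PySem.Dict.empty).items from rfl,
    pvS_build (pvIncPA l) (fun s => (pvPairA l).getD (t - (s + c)) 0)]
  unfold pvIncPA
  rw [List.map_flatMap, pvSum_flatMap]
  apply congrArg; apply List.map_congr_left; intro a _
  rw [List.map_map]
  apply congrArg; apply List.map_congr_left; intro b _
  show (1 : Int) * (pvPairA l).getD (t - (a + b + c)) 0 = pvP2 l (t - (a + b + c))
  rw [one_mul, pvPairA_getD]

-- ===== B's closed form via "d represents multiset L" =====

-- pairwise sums of two multisets (generating-polynomial product on the value side)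
def pvAdds (L1 L2 : List Int) : List Int := L1.flatMap (fun a => L2.map (fun b => a + b))

-- d is a counter of the multiset L (built from some increment stream with L's weight profile)
def pvRep (d : PySem.Dict Int Int) (L : List Int) : Prop :=
  ∃ inc : List (Int × Int), d = inc.foldl pvStep PySem.Dict.empty ∧
    ∀ h : Int → Int, (inc.map (fun p => p.2 * h p.1)).sum = (L.map h).sum

lemma pvRep_items {d : PySem.Dict Int Int} {L : List Int} (hr : pvRep d L) (h : Int → Int) :
    (d.items.map (fun p => p.2 * h p.1)).sum = (L.map h).sum := by
  obtain ⟨inc, rfl, hs⟩ := hr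
  rw [pvS_build inc h, hs h]

lemma pvRep_getD {d : PySem.Dict Int Int} {L : List Int} (hr : pvRep d L) (x : Int) :
    d.getD x 0 = (L.map (fun y => if y = x then (1 : Int) else 0)).sum := by
  obtain ⟨inc, rfl, hs⟩ := hr
  rw [getD_foldl_pvStep, PySem.Dict.getD_empty, zero_add]
  have : pvCntAt inc x = (inc.map (fun p => p.2 * (if p.1 = x then (1 : Int) else 0))).sum := by
    unfold pvCntAt
    apply congrArg; apply List.map_congr_left; intro p _
    split_ifs <;> ring
  rw [this, hs (fun y => if y = x then (1 : Int) else 0)]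

lemma pvRep_counter (l : List Int) : pvRep (PySem.Dict.counter l) l := by
  refine ⟨l.map (fun x => (x, (1 : Int))), ?_, ?_⟩
  · rw [PySem.Dict.counter_eq_foldl, List.foldl_map]
    rfl
  · intro h
    rw [List.map_map]
    apply congrArg; apply List.map_congr_left; intro x _
    simp

lemma pvRep_convolve {d1 d2 : PySem.Dict Int Int} {L1 L2 : List Int}
    (h1 : pvRep d1 L1) (h2 : pvRep d2 L2) : pvRep (pvConvolve d1 d2) (pvAdds L1 L2) := by
  refine ⟨d1.items.flatMap (fun p => d2.items.map (fun q => (p.1 + q.1, p.2 * q.2))), ?_, ?_⟩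
  · unfold pvConvolve
    rw [List.foldl_flatMap]
    have : (fun (out : PySem.Dict Int Int) (p : Int × Int) =>
          (d2.items.map (fun q => (p.1 + q.1, p.2 * q.2))).foldl pvStep out)
        = (fun out p => d2.items.foldl
            (fun out q => out.modify (p.1 + q.1) 0 (· + p.2 * q.2)) out) := by
      funext out p; rw [List.foldl_map]; rfl
    rw [this]
  · intro h
    rw [List.map_flatMap, pvSum_flatMap]
    have hin : ∀ p : Int × Int,
        ((d2.items.map (fun q => (p.1 + q.1, p.2 * q.2))).map
          (fun r => r.2 * h r.1)).sum
        = p.2 * ((fun a => (L2.map (fun b => h (a + b))).sum) p.1) := by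
      intro p
      rw [List.map_map]
      have e : ((fun r : Int × Int => r.2 * h r.1) ∘ fun q => (p.1 + q.1, p.2 * q.2))
          = fun q : Int × Int => p.2 * q.2 * ((fun b => h (p.1 + b)) q.1) := by
        funext q; show p.2 * q.2 * h (p.1 + q.1) = _; ring
      rw [e, pvFactor d2.items p.2 (fun b => h (p.1 + b)),
        pvRep_items h2 (fun b => h (p.1 + b))]
    rw [List.map_congr_left (fun p _ => hin p),
      pvRep_items h1 (fun a => (L2.map (fun b => h (a + b))).sum)]
    unfold pvAdds
    rw [List.map_flatMap, pvSum_flatMap]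
    apply congrArg; apply List.map_congr_left; intro a _
    rw [List.map_map]
    rfl

-- the multiset of five-fold sums B's p5 counts
def pvS5 (l : List Int) : List Int := pvAdds (pvAdds (pvAdds (pvAdds l l) l) l) l

lemma B_closed (l : List Int) :
    count_sextuples_alt l
      = (l.map (fun f => ((pvS5 l).map (fun y => if y = f then (1 : Int) else 0)).sum)).sum := by
  unfold count_sextuples_alt
  dsimp only
  have hr : PySem.List.pyRange 0 4 1 = [0, 1, 2, 3] := by decide
  rw [hr]
  simp only [List.foldl_cons, List.foldl_nil]
  have r1 := pvRep_counter l
  have r5 := pvRep_convolve (pvRep_convolve (pvRep_convolve (pvRep_convolve r1 r1) r1) r1) r1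
  rw [pvRep_items r1 (fun f => (pvConvolve (pvConvolve (pvConvolve (pvConvolve (PySem.Dict.counter l) (PySem.Dict.counter l)) (PySem.Dict.counter l)) (PySem.Dict.counter l)) (PySem.Dict.counter l)).getD f 0)]
  apply congrArg; apply List.map_congr_left; intro f _
  exact pvRep_getD r5 f

-- sums over pairwise-sum multisets unfold to nested sums
lemma pvAdds_sum (L1 L2 : List Int) (h : Int → Int) :
    ((pvAdds L1 L2).map h).sum = (L1.map (fun a => (L2.map (fun b => h (a + b))).sum)).sum := by
  unfold pvAdds
  rw [List.map_flatMap, pvSum_flatMap]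
  apply congrArg; apply List.map_congr_left; intro a _
  rw [List.map_map]
  rfl

-- unfold pvS5's flatMaps into the canonical five-nested sum
lemma pvS5_sum (l : List Int) (f : Int) :
    ((pvS5 l).map (fun y => if y = f then (1 : Int) else 0)).sum
      = (l.map (fun a => (l.map (fun b => (l.map (fun c => (l.map (fun d =>
          (l.map (fun e => if a + b + c + d + e = f then (1 : Int) else 0)).sum)).sum)).sum)).sum)).sum := by
  unfold pvS5
  rw [pvAdds_sum, pvAdds_sum, pvAdds_sum, pvAdds_sum]

-- A's closed form also equals the canonical five-nested sum
lemma pvF6_eq (l : List Int) :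
    pvF6 l
      = (l.map (fun f => (l.map (fun a => (l.map (fun b => (l.map (fun c => (l.map (fun d =>
          (l.map (fun e => if a + b + c + d + e = f then (1 : Int) else 0)).sum)).sum)).sum)).sum)).sum)).sum := by
  unfold pvF6
  apply congrArg; apply List.map_congr_left; intro f _
  -- rewrite P2's indicator to the joint condition
  have hterm : ∀ c a b : Int, pvP2 l (f - (a + b + c))
      = (l.map (fun d => (l.map (fun e => if a + b + c + d + e = f then (1 : Int) else 0)).sum)).sum := by
    intro c a b
    unfold pvP2
    apply congrArg; apply List.map_congr_left; intro d _
    apply congrArg; apply List.map_congr_left; intro e _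
    have : (d + e = f - (a + b + c)) ↔ (a + b + c + d + e = f) := by omega
    simp only [this]
  have h1 : (l.map (fun c => (l.map (fun a => (l.map (fun b => pvP2 l (f - (a + b + c)))).sum)).sum)).sum
      = (l.map (fun c => (l.map (fun a => (l.map (fun b =>
          (l.map (fun d => (l.map (fun e => if a + b + c + d + e = f then (1 : Int) else 0)).sum)).sum)).sum)).sum)).sum := by
    apply congrArg; apply List.map_congr_left; intro c _
    apply congrArg; apply List.map_congr_left; intro a _
    apply congrArg; apply List.map_congr_left; intro b _
    exact hterm c a b
  rw [h1]
  -- move c innermost past a and b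
  rw [pvSum_comm l l (fun c a => (l.map (fun b =>
      (l.map (fun d => (l.map (fun e => if a + b + c + d + e = f then (1 : Int) else 0)).sum)).sum)).sum)]
  apply congrArg; apply List.map_congr_left; intro a _
  rw [pvSum_comm l l (fun c b =>
      (l.map (fun d => (l.map (fun e => if a + b + c + d + e = f then (1 : Int) else 0)).sum)).sum)]

-- ===== VERDICT (by name: the statement is the Claim_ definition above) =====
theorem count_sextuples_spec : Claim_equal_count_sextuples := by
  intro numbers _
  show count_sextuples numbers = count_sextuples_alt numbers
  rw [A_closed, B_closed, pvF6_eq]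
  apply congrArg; apply List.map_congr_left; intro f _
  rw [pvS5_sum]
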